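-- pv_equiv track=rewrite | github.com/IvanHRz/Chronos-DFIR | engine/ingestor.py | _classify_trc_level
-- ===== SOURCE A (Python) =====
-- def _classify_trc_level(message: str) -> str:
--     """Classify trace message severity."""
--     msg_lower = message.lower()
--     if any(w in msg_lower for w in ['error', 'fatal', 'fail', 'exception', 'ora-', 'crash']):
--         return "Error"
--     if any(w in msg_lower for w in ['warn', 'timeout', 'retry', 'slow']):
--         return "Warning"
--     if any(w in msg_lower for w in ['debug', 'trace', 'verbose']):
--         return "Debug"
--     return "Info"
-- ===== SOURCE B (Python) =====
-- _SEVERITY = {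
--     'error': 0, 'fatal': 0, 'fail': 0, 'exception': 0, 'ora-': 0, 'crash': 0,
--     'warn': 1, 'timeout': 1, 'retry': 1, 'slow': 1,
--     'debug': 2, 'trace': 2, 'verbose': 2,
-- }
-- _LABELS = {0: 'Error', 1: 'Warning', 2: 'Debug'}
--
-- def _classify_trc_level(message: str) -> str:
--     """Classify trace message severity."""
--     msg = message.lower()
--     best = 3
--     for kw, pri in _SEVERITY.items():
--         if pri < best and kw in msg:
--             best = pri
--     return _LABELS.get(best, 'Info')
-- ===== Notes on version B (the rewrite author's own statement) =====
-- stated objective: alternative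
-- what changed: Replaced the three sequential any()-group checks with a single flat pass over a keyword-to-priority table that tracks the minimum matching priority, then maps that priority to its label with the default as fallback.
import Mathlib
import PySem

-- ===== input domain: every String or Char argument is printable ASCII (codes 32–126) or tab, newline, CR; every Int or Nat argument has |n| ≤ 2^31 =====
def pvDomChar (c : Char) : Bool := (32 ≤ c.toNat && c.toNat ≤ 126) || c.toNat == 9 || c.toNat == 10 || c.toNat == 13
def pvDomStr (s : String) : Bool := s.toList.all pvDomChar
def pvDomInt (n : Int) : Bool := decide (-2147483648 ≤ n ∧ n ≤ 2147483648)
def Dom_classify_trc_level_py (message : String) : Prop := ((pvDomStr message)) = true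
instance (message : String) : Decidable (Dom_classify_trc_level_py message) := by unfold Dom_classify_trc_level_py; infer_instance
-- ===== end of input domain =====

-- B replaces A's three grouped any() checks by one flat keyword->priority scan keeping a minimum; alternative decomposition, same cost.

-- ===== PORT A =====
def classify_trc_level_py (message : String) : String :=
  let msg_lower := PySem.Str.lower message
  if ["error", "fatal", "fail", "exception", "ora-", "crash"].any
        (fun w => PySem.Str.isIn w msg_lower) then "Error"
  else if ["warn", "timeout", "retry", "slow"].any
        (fun w => PySem.Str.isIn w msg_lower) then "Warning"
  else if ["debug", "trace", "verbose"].any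
        (fun w => PySem.Str.isIn w msg_lower) then "Debug"
  else "Info"

-- ===== PORT B =====
def pvSeverityTable : List (String × Int) :=
  [("error", 0), ("fatal", 0), ("fail", 0), ("exception", 0), ("ora-", 0), ("crash", 0),
   ("warn", 1), ("timeout", 1), ("retry", 1), ("slow", 1),
   ("debug", 2), ("trace", 2), ("verbose", 2)]

def pvLabelTable : PySem.Dict Int String :=
  PySem.Dict.ofList [(0, "Error"), (1, "Warning"), (2, "Debug")]

def classify_trc_level_py_alt (message : String) : String :=
  let msg := PySem.Str.lower message
  let best := pvSeverityTable.foldl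
    (fun best p => if decide (p.2 < best) && PySem.Str.isIn p.1 msg then p.2 else best) 3
  pvLabelTable.getD best "Info"

-- ===== PRECONDITION & SPEC =====
def Spec_classify_trc_level_py (message : String) (out : String) : Prop := out = classify_trc_level_py_alt message
instance (message : String) (out : String) : Decidable (Spec_classify_trc_level_py message out) := by unfold Spec_classify_trc_level_py; infer_instance

-- ===== CLAIM (what is proved, stated in full; the proofs are below) =====
def Claim_equal_classify_trc_level_py : Prop := ∀ (message : String), Dom_classify_trc_level_py message → Spec_classify_trc_level_py message (classify_trc_level_py message)

-- ===== LEMMAS AND PROOFS =====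

-- Both sides are the same function of the 13 keyword-membership booleans; prove it
-- for an arbitrary membership predicate f, unfolding the fold one keyword at a time:
-- a matching keyword collapses every later step, a non-matching one leaves the
-- accumulator unchanged.
theorem classify_key (f : String → Bool) :
    (if ["error", "fatal", "fail", "exception", "ora-", "crash"].any f then "Error"
     else if ["warn", "timeout", "retry", "slow"].any f then "Warning"
     else if ["debug", "trace", "verbose"].any f then "Debug"
     else "Info")
    = pvLabelTable.getD
        (pvSeverityTable.foldl
          (fun best p => if decide (p.2 < best) && f p.1 then p.2 else best) 3) "Info" := by
  simp only [List.any_cons, List.any_nil, pvSeverityTable]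
  rw [List.foldl_cons]
  try dsimp only
  cases hb1 : f "error" with
  | true =>
    simp [List.foldl_cons, List.foldl_nil]
    decide
  | false =>
    simp only [Bool.and_false, Bool.false_eq_true, if_false, Bool.false_or, Bool.or_false]
    rw [List.foldl_cons]
    try dsimp only
    cases hb2 : f "fatal" with
    | true =>
      simp [List.foldl_cons, List.foldl_nil]
      decide
    | false =>
      simp only [Bool.and_false, Bool.false_eq_true, if_false, Bool.false_or, Bool.or_false]
      rw [List.foldl_cons]
      try dsimp only
      cases hb3 : f "fail" with
      | true =>
        simp [List.foldl_cons, List.foldl_nil]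
        decide
      | false =>
        simp only [Bool.and_false, Bool.false_eq_true, if_false, Bool.false_or, Bool.or_false]
        rw [List.foldl_cons]
        try dsimp only
        cases hb4 : f "exception" with
        | true =>
          simp [List.foldl_cons, List.foldl_nil]
          decide
        | false =>
          simp only [Bool.and_false, Bool.false_eq_true, if_false, Bool.false_or, Bool.or_false]
          rw [List.foldl_cons]
          try dsimp only
          cases hb5 : f "ora-" with
          | true =>
            simp [List.foldl_cons, List.foldl_nil]
            decide
          | false =>
            simp only [Bool.and_false, Bool.false_eq_true, if_false, Bool.false_or, Bool.or_false]
            rw [List.foldl_cons]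
            try dsimp only
            cases hb6 : f "crash" with
            | true =>
              simp [List.foldl_cons, List.foldl_nil]
              decide
            | false =>
              simp only [Bool.and_false, Bool.false_eq_true, if_false, Bool.false_or, Bool.or_false]
              rw [List.foldl_cons]
              try dsimp only
              cases hb7 : f "warn" with
              | true =>
                simp [List.foldl_cons, List.foldl_nil]
                decide
              | false =>
                simp only [Bool.and_false, Bool.false_eq_true, if_false, Bool.false_or, Bool.or_false]
                rw [List.foldl_cons]
                try dsimp only
                cases hb8 : f "timeout" with
                | true =>
                  simp [List.foldl_cons, List.foldl_nil]
                  decide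
                | false =>
                  simp only [Bool.and_false, Bool.false_eq_true, if_false, Bool.false_or, Bool.or_false]
                  rw [List.foldl_cons]
                  try dsimp only
                  cases hb9 : f "retry" with
                  | true =>
                    simp [List.foldl_cons, List.foldl_nil]
                    decide
                  | false =>
                    simp only [Bool.and_false, Bool.false_eq_true, if_false, Bool.false_or, Bool.or_false]
                    rw [List.foldl_cons]
                    try dsimp only
                    cases hb10 : f "slow" with
                    | true =>
                      simp [List.foldl_cons, List.foldl_nil]
                      decide
                    | false =>
                      simp only [Bool.and_false, Bool.false_eq_true, if_false, Bool.false_or, Bool.or_false]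
                      rw [List.foldl_cons]
                      try dsimp only
                      cases hb11 : f "debug" with
                      | true =>
                        simp [List.foldl_cons, List.foldl_nil]
                        decide
                      | false =>
                        simp only [Bool.and_false, Bool.false_eq_true, if_false, Bool.false_or, Bool.or_false]
                        rw [List.foldl_cons]
                        try dsimp only
                        cases hb12 : f "trace" with
                        | true =>
                          simp [List.foldl_cons, List.foldl_nil]
                          decide
                        | false =>
                          simp only [Bool.and_false, Bool.false_eq_true, if_false, Bool.false_or, Bool.or_false]
                          rw [List.foldl_cons]
                          try dsimp only
                          cases hb13 : f "verbose" with
                          | true =>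
                            simp [List.foldl_cons, List.foldl_nil]
                            decide
                          | false =>
                            simp only [Bool.and_false, Bool.false_eq_true, if_false, Bool.false_or, Bool.or_false]
                            rfl

theorem classify_trc_level_eq (message : String) :
    classify_trc_level_py message = classify_trc_level_py_alt message :=
  classify_key (fun w => PySem.Str.isIn w (PySem.Str.lower message))

-- ===== VERDICT (by name: the statement is the Claim_ definition above) =====
theorem classify_trc_level_py_spec : Claim_equal_classify_trc_level_py := by
  intro message _
  unfold Spec_classify_trc_level_py
  exact classify_trc_level_eq message
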